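-- pv_equiv track=rewrite | github.com/oceanobservatories/ooi-status | ooi_status/metadata_queries.py | filter_spans
-- ===== SOURCE A (Python) =====
-- def filter_spans(spans, deploy_data):
--     """
--     Given an ordered list of spans and an ordered list of deployment bounds,
--     filter all spans to inside the bounds of the deployments.
--     :param spans: tuples representing (start, span_type, stop)
--     :param deploy_data: tuples representing (start, deployment number, stop)
--     :return: spans adjusted to fit inside deployment bounds
--     """
--     index = 0
--     new_spans = []
--     for start, _, stop in deploy_data:
--         for span_start, span_type, span_stop, in spans:
--             if span_start > stop:
--                 if index > 0:
--                     index -= 1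
--                 break
--
--             if span_start < start:
--                 span_start = start
--
--             if span_stop > stop:
--                 span_stop = stop
--
--             new_spans.append((span_start, span_type, span_stop))
--             index += 1
--     return new_spans
-- ===== SOURCE B (Python) =====
-- def filter_spans(spans, deploy_data):
--     """
--     Given an ordered list of spans and an ordered list of deployment bounds,
--     filter all spans to inside the bounds of the deployments.
--
--     Loop-interchanged version: one pass over the spans (outer), maintaining for
--     each deployment an aliveness flag and a bucket of clamped spans; a
--     deployment stops collecting permanently at the first span starting after
--     its stop.  The buckets are concatenated at the end.
--     """
--     buckets = [[] for _ in deploy_data]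
--     alive = [True] * len(deploy_data)
--     for span_start, span_type, span_stop in spans:
--         for i, (start, _, stop) in enumerate(deploy_data):
--             if not alive[i]:
--                 continue
--             if span_start > stop:
--                 alive[i] = False
--             else:
--                 buckets[i].append((max(span_start, start), span_type, min(span_stop, stop)))
--     out = []
--     for b in buckets:
--         out.extend(b)
--     return out
-- ===== Notes on version B (the rewrite author's own statement) =====
-- stated objective: alternative
-- what changed: B interchanges the loops: instead of A's deployment-outer scan that re-walks the span list and breaks at the first span past each stop, B makes a single outer pass over the spans maintaining per-deployment aliveness flags and buckets (a deployment goes dead at its first too-late span), then concatenates the buckets.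
import Mathlib
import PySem

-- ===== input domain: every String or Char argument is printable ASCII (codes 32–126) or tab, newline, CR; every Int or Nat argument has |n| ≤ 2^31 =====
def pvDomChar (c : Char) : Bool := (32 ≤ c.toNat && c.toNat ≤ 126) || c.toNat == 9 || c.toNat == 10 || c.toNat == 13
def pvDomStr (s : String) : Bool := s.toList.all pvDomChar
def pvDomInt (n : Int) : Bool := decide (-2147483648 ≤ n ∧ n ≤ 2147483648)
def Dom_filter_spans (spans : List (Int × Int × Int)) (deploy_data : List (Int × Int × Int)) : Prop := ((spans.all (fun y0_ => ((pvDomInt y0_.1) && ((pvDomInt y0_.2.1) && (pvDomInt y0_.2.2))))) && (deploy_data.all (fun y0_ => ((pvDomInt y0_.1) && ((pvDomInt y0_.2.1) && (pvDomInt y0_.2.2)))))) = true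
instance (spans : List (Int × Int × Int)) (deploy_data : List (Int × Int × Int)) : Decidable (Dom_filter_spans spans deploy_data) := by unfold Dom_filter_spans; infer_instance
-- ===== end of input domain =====

-- B interchanges A's loops: one pass over the spans maintaining per-deployment
-- aliveness flags and buckets, concatenated at the end; objective: alternative, same cost.

-- ===== PORT A =====
-- inner `for span in spans` loop of A: carries (index, new_spans) and stops at
-- the first span with span_start > stop (mirroring `break`).
def filterSpansInnerA (start stop : Int) :
    List (Int × Int × Int) → Int → List (Int × Int × Int) → Int × List (Int × Int × Int)
  | [], index, acc => (index, acc)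
  | (span_start, span_type, span_stop) :: rest, index, acc =>
    if span_start > stop then
      (if index > 0 then index - 1 else index, acc)
    else
      let span_start := if span_start < start then start else span_start
      let span_stop := if span_stop > stop then stop else span_stop
      filterSpansInnerA start stop rest (index + 1) (acc ++ [(span_start, span_type, span_stop)])

def filter_spans (spans : List (Int × Int × Int)) (deploy_data : List (Int × Int × Int)) : List (Int × Int × Int) :=
  (deploy_data.foldl
    (fun (st : Int × List (Int × Int × Int)) d =>
      filterSpansInnerA d.1 d.2.2 spans st.1 st.2)
    (0, [])).2

-- ===== PORT B =====
-- per-deployment state of B: (deployment, alive flag, bucket); one span updates it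
def updB (sp : Int × Int × Int) (x : (Int × Int × Int) × Bool × List (Int × Int × Int)) :
    (Int × Int × Int) × Bool × List (Int × Int × Int) :=
  if !x.2.1 then x
  else if sp.1 > x.1.2.2 then (x.1, false, x.2.2)
  else (x.1, true, x.2.2 ++ [(max sp.1 x.1.1, sp.2.1, min sp.2.2 x.1.2.2)])

def filter_spans_alt (spans : List (Int × Int × Int)) (deploy_data : List (Int × Int × Int)) : List (Int × Int × Int) :=
  (spans.foldl (fun st sp => st.map (updB sp))
      (deploy_data.map (fun d => (d, true, ([] : List (Int × Int × Int)))))).flatMap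
    (fun x => x.2.2)

-- ===== PRECONDITION & SPEC =====
def Spec_filter_spans (spans : List (Int × Int × Int)) (deploy_data : List (Int × Int × Int)) (out : List (Int × Int × Int)) : Prop := out = filter_spans_alt spans deploy_data
instance (spans : List (Int × Int × Int)) (deploy_data : List (Int × Int × Int)) (out : List (Int × Int × Int)) : Decidable (Spec_filter_spans spans deploy_data out) := by unfold Spec_filter_spans; infer_instance

-- ===== CLAIM (what is proved, stated in full; the proofs are below) =====
def Claim_equal_filter_spans : Prop := ∀ (spans : List (Int × Int × Int)) (deploy_data : List (Int × Int × Int)), Dom_filter_spans spans deploy_data → Spec_filter_spans spans deploy_data (filter_spans spans deploy_data)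

-- ===== LEMMAS AND PROOFS =====

-- common characterisation: the clamped prefix of spans up to the first start > stop
def clampedPrefix (start stop : Int) : List (Int × Int × Int) → List (Int × Int × Int)
  | [] => []
  | (s, t, e) :: rest =>
    if s > stop then []
    else (max s start, t, min e stop) :: clampedPrefix start stop rest

-- A's inner loop appends exactly the clamped prefix
theorem filterSpansInnerA_snd (start stop : Int) :
    ∀ (l : List (Int × Int × Int)) (index : Int) (acc : List (Int × Int × Int)),
      (filterSpansInnerA start stop l index acc).2 = acc ++ clampedPrefix start stop l := by
  intro l
  induction l with
  | nil => intro index acc; simp [filterSpansInnerA, clampedPrefix]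
  | cons hd rest ih =>
      intro index acc
      obtain ⟨s, t, e⟩ := hd
      by_cases h : s > stop
      · simp [filterSpansInnerA, clampedPrefix, h]
      · have h1 : (if s < start then start else s) = max s start := by omega
        have h2 : (if e > stop then stop else e) = min e stop := by omega
        simp only [filterSpansInnerA, if_neg h, clampedPrefix, ih, h1, h2]
        simp

-- the outer fold over deploy_data accumulates the concatenation of clamped prefixes
theorem filterSpansA_fold (spans : List (Int × Int × Int)) :
    ∀ (ds : List (Int × Int × Int)) (index : Int) (acc : List (Int × Int × Int)),
      (ds.foldl (fun (st : Int × List (Int × Int × Int)) d =>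
          filterSpansInnerA d.1 d.2.2 spans st.1 st.2) (index, acc)).2
        = acc ++ ds.flatMap (fun d => clampedPrefix d.1 d.2.2 spans) := by
  intro ds
  induction ds with
  | nil => intro index acc; simp
  | cons d rest ih =>
      intro index acc
      simp only [List.foldl_cons, List.flatMap_cons]
      have h := filterSpansInnerA_snd d.1 d.2.2 spans index acc
      calc (rest.foldl (fun st d' => filterSpansInnerA d'.1 d'.2.2 spans st.1 st.2)
              (filterSpansInnerA d.1 d.2.2 spans index acc)).2
          = (rest.foldl (fun st d' => filterSpansInnerA d'.1 d'.2.2 spans st.1 st.2)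
              ((filterSpansInnerA d.1 d.2.2 spans index acc).1,
               (filterSpansInnerA d.1 d.2.2 spans index acc).2)).2 := by simp
        _ = (filterSpansInnerA d.1 d.2.2 spans index acc).2
              ++ rest.flatMap (fun d' => clampedPrefix d'.1 d'.2.2 spans) := ih _ _
        _ = acc ++ (clampedPrefix d.1 d.2.2 spans
              ++ rest.flatMap (fun d' => clampedPrefix d'.1 d'.2.2 spans)) := by rw [h]; simp

-- pointwise updates commute with the fold over spans
theorem foldl_map_updB (spans : List (Int × Int × Int)) :
    ∀ (init : List ((Int × Int × Int) × Bool × List (Int × Int × Int))),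
      spans.foldl (fun st sp => st.map (updB sp)) init
        = init.map (fun x => spans.foldl (fun x sp => updB sp x) x) := by
  induction spans with
  | nil => intro init; simp
  | cons sp rest ih =>
      intro init
      simp only [List.foldl_cons, ih, List.map_map]
      rfl

-- a dead deployment stays unchanged
theorem foldl_updB_dead (d : Int × Int × Int) :
    ∀ (spans : List (Int × Int × Int)) (acc : List (Int × Int × Int)),
      spans.foldl (fun x sp => updB sp x) (d, false, acc) = (d, false, acc) := by
  intro spans
  induction spans with
  | nil => intro acc; rfl
  | cons sp rest ih =>
      intro acc
      have hstep : updB sp (d, false, acc) = (d, false, acc) := by simp [updB]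
      simp only [List.foldl_cons, hstep]
      exact ih acc

-- a live deployment's bucket ends as the clamped prefix
theorem foldl_updB_live (d : Int × Int × Int) :
    ∀ (spans : List (Int × Int × Int)) (acc : List (Int × Int × Int)),
      (spans.foldl (fun x sp => updB sp x) (d, true, acc)).2.2
        = acc ++ clampedPrefix d.1 d.2.2 spans := by
  intro spans
  induction spans with
  | nil => intro acc; simp [clampedPrefix]
  | cons sp rest ih =>
      intro acc
      obtain ⟨s, t, e⟩ := sp
      by_cases h : s > d.2.2
      · have hstep : updB (s, t, e) (d, true, acc) = (d, false, acc) := by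
          simp [updB]; omega
        simp only [List.foldl_cons, hstep, foldl_updB_dead, clampedPrefix]
        rw [if_pos (by simpa using h)]
        simp
      · have hstep : updB (s, t, e) (d, true, acc)
            = (d, true, acc ++ [(max s d.1, t, min e d.2.2)]) := by
          simp only [updB]
          rw [if_neg (by simp), if_neg (by simpa using h)]
        simp only [List.foldl_cons, hstep, clampedPrefix]
        rw [if_neg (by simpa using h)]
        simpa using ih (acc ++ [(max s d.1, t, min e d.2.2)])

-- ===== VERDICT (by name: the statement is the Claim_ definition above) =====
theorem filter_spans_spec : Claim_equal_filter_spans := by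
  intro spans deploy_data _
  unfold Spec_filter_spans filter_spans filter_spans_alt
  rw [foldl_map_updB, List.map_map]
  have hB : (deploy_data.map
        (fun d => spans.foldl (fun x sp => updB sp x) (d, true, ([] : List (Int × Int × Int))))).flatMap
        (fun x => x.2.2)
      = deploy_data.flatMap (fun d => clampedPrefix d.1 d.2.2 spans) := by
    simp only [List.flatMap_map]
    exact List.flatMap_congr (fun d _ => by simpa using foldl_updB_live d spans [])
  have hA := filterSpansA_fold spans deploy_data 0 []
  simp only [hA]
  rw [← hB]
  rfl
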